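-- pv_equiv track=rewrite | github.com/kshaab/Banking-Widget | src/actions_with_bank_operations.py | process_bank_operations
-- ===== SOURCE A (Python) =====
-- from collections import Counter
--
-- def process_bank_operations(data:list[dict], categories:list)->dict:
--     separated_categories = []
--     for transactions in data:
--         sep_category = transactions.get("description")
--         if sep_category and sep_category in categories:
--             separated_categories.append(sep_category)
--
--     counted = Counter(separated_categories)
--     return dict(counted)
-- ===== SOURCE B (Python) =====
-- def process_bank_operations(data: list[dict], categories: list) -> dict:
--     # Alternative decomposition: discover qualifying descriptions in order of
--     # first appearance, then count each one by a separate rescan of data.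
--     keys = []
--     for tx in data:
--         d = tx.get("description")
--         if d and d in categories and d not in keys:
--             keys.append(d)
--     return {k: sum(1 for tx in data if tx.get("description") == k) for k in keys}
-- ===== Notes on version B (the rewrite author's own statement) =====
-- stated objective: alternative
-- what changed: Replaces A's collect-into-a-list-then-Counter pipeline with ordered discovery of the distinct qualifying descriptions followed by a per-key rescan of data that counts each key (nested scans, no Counter, no intermediate occurrence list).
import Mathlib
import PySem

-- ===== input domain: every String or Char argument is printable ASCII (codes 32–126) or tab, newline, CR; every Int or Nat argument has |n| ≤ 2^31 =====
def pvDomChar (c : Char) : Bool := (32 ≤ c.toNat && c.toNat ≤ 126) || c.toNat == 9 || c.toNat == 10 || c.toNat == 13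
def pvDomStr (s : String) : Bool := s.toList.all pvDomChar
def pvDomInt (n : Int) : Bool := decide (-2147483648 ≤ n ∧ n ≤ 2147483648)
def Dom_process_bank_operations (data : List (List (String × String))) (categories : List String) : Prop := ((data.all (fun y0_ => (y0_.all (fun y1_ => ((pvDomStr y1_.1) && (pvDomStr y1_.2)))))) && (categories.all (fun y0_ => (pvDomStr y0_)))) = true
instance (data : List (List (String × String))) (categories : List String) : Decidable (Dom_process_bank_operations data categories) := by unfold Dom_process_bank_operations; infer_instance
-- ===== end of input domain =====

-- B replaces A's collect-then-Counter pipeline with ordered discovery of the distinct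
-- qualifying descriptions plus a per-key counting rescan of data (objective: alternative).

-- ===== PORT A =====
def process_bank_operations (data : List (List (String × String))) (categories : List String) : List (String × Int) :=
  let separated_categories := data.foldl (fun acc transactions =>
    match (PySem.Dict.mk transactions).get? "description" with
    | some sep_category =>
        if sep_category ≠ "" ∧ sep_category ∈ categories then acc ++ [sep_category] else acc
    | none => acc) []
  (PySem.Dict.counter separated_categories).items

-- ===== PORT B =====
def process_bank_operations_alt (data : List (List (String × String))) (categories : List String) : List (String × Int) :=
  let keys := data.foldl (fun ks tx =>
    match (PySem.Dict.mk tx).get? "description" with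
    | some d => if d ≠ "" ∧ d ∈ categories ∧ d ∉ ks then ks ++ [d] else ks
    | none => ks) []
  keys.map (fun k =>
    (k, (data.map (fun tx => if (PySem.Dict.mk tx).get? "description" = some k then (1:Int) else 0)).sum))

-- ===== PRECONDITION & SPEC =====
def Spec_process_bank_operations (data : List (List (String × String))) (categories : List String) (out : List (String × Int)) : Prop := out = process_bank_operations_alt data categories
instance (data : List (List (String × String))) (categories : List String) (out : List (String × Int)) : Decidable (Spec_process_bank_operations data categories out) := by unfold Spec_process_bank_operations; infer_instance

-- ===== CLAIM (what is proved, stated in full; the proofs are below) =====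
def Claim_equal_process_bank_operations : Prop := ∀ (data : List (List (String × String))) (categories : List String), Dom_process_bank_operations data categories → Spec_process_bank_operations data categories (process_bank_operations data categories)

-- ===== LEMMAS AND PROOFS =====

-- the qualifying description of a transaction, if any (truthy and in categories)
def pvF (categories : List String) (tx : List (String × String)) : Option String :=
  match (PySem.Dict.mk tx).get? "description" with
  | some s => if s ≠ "" ∧ s ∈ categories then some s else none
  | none => none

theorem pvF_none (categories : List String) (tx : List (String × String))
    (h : (PySem.Dict.mk tx).get? "description" = none) : pvF categories tx = none := by
  unfold pvF; rw [h]

theorem pvF_some_pos (categories : List String) (tx : List (String × String)) (s : String)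
    (h : (PySem.Dict.mk tx).get? "description" = some s) (hq : s ≠ "" ∧ s ∈ categories) :
    pvF categories tx = some s := by
  unfold pvF; rw [h]; exact if_pos hq

theorem pvF_some_neg (categories : List String) (tx : List (String × String)) (s : String)
    (h : (PySem.Dict.mk tx).get? "description" = some s) (hq : ¬ (s ≠ "" ∧ s ∈ categories)) :
    pvF categories tx = none := by
  unfold pvF; rw [h]; exact if_neg hq

theorem pvA_fold (categories : List String) (l : List (List (String × String))) (acc : List String) :
    l.foldl (fun acc tx =>
      match (PySem.Dict.mk tx).get? "description" with
      | some s => if s ≠ "" ∧ s ∈ categories then acc ++ [s] else acc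
      | none => acc) acc = acc ++ l.filterMap (pvF categories) := by
  induction l generalizing acc with
  | nil => simp
  | cons tx rest ih =>
    simp only [List.foldl_cons, List.filterMap_cons]
    cases h : (PySem.Dict.mk tx).get? "description" with
    | none => rw [pvF_none categories tx h]; simp [ih]
    | some s =>
      by_cases hq : s ≠ "" ∧ s ∈ categories
      · rw [pvF_some_pos categories tx s h hq]
        show List.foldl _ (if s ≠ "" ∧ s ∈ categories then acc ++ [s] else acc) rest
          = acc ++ (s :: List.filterMap (pvF categories) rest)
        rw [if_pos hq, ih]; simp
      · rw [pvF_some_neg categories tx s h hq]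
        show List.foldl _ (if s ≠ "" ∧ s ∈ categories then acc ++ [s] else acc) rest
          = acc ++ List.filterMap (pvF categories) rest
        rw [if_neg hq, ih]

theorem pvB_fold (categories : List String) (l : List (List (String × String))) (ks : PySem.Set String) :
    l.foldl (fun ks tx =>
      match (PySem.Dict.mk tx).get? "description" with
      | some d => if d ≠ "" ∧ d ∈ categories ∧ d ∉ ks then ks ++ [d] else ks
      | none => ks) ks = PySem.Set.update ks (l.filterMap (pvF categories)) := by
  induction l generalizing ks with
  | nil => simp [PySem.Set.update]
  | cons tx rest ih =>
    simp only [List.foldl_cons, List.filterMap_cons]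
    cases h : (PySem.Dict.mk tx).get? "description" with
    | none => rw [pvF_none categories tx h]; exact ih ks
    | some d =>
      by_cases hq : d ≠ "" ∧ d ∈ categories
      · rw [pvF_some_pos categories tx d h hq, PySem.Set.update_cons]
        show List.foldl _ (if d ≠ "" ∧ d ∈ categories ∧ d ∉ ks then ks ++ [d] else ks) rest
          = PySem.Set.update (PySem.Set.add ks d) (List.filterMap (pvF categories) rest)
        by_cases hm : d ∈ ks
        · rw [if_neg (by tauto), ih, PySem.Set.add_of_mem hm]
        · rw [if_pos ⟨hq.1, hq.2, hm⟩, ih, PySem.Set.add_of_not_mem hm]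
      · rw [pvF_some_neg categories tx d h hq]
        show List.foldl _ (if d ≠ "" ∧ d ∈ categories ∧ d ∉ ks then ks ++ [d] else ks) rest
          = PySem.Set.update ks (List.filterMap (pvF categories) rest)
        rw [if_neg (by tauto)]; exact ih ks

theorem pvF_eq_some_iff (categories : List String) (tx : List (String × String)) (k : String)
    (hk : k ≠ "" ∧ k ∈ categories) :
    (pvF categories tx = some k) ↔ (PySem.Dict.mk tx).get? "description" = some k := by
  unfold pvF
  cases h : (PySem.Dict.mk tx).get? "description" with
  | none => simp
  | some s =>
    show (if s ≠ "" ∧ s ∈ categories then some s else none) = some k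
      ↔ some s = some k
    by_cases hq : s ≠ "" ∧ s ∈ categories
    · rw [if_pos hq]
    · rw [if_neg hq]
      simp only [Option.some.injEq]
      constructor
      · intro hc; cases hc
      · intro hsk; subst hsk; exact absurd hk hq

-- ===== VERDICT (by name: the statement is the Claim_ definition above) =====
theorem process_bank_operations_spec : Claim_equal_process_bank_operations := by
  intro data categories _
  unfold Spec_process_bank_operations process_bank_operations process_bank_operations_alt
  rw [pvA_fold, pvB_fold]
  simp only [List.nil_append]
  rw [PySem.Set.update_nil_left, PySem.Dict.items_counter]
  apply List.map_congr_left
  intro k hkmem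
  have hkS : k ∈ data.filterMap (pvF categories) :=
    (PySem.Set.mem_ofList (data.filterMap (pvF categories)) k).1 hkmem
  have hq : k ≠ "" ∧ k ∈ categories := by
    rcases List.mem_filterMap.1 hkS with ⟨tx, _, hf⟩
    unfold pvF at hf
    cases h : (PySem.Dict.mk tx).get? "description" with
    | none =>
      rw [h] at hf
      cases (show (none : Option String) = some k from hf)
    | some s =>
      rw [h] at hf
      have hf' : (if s ≠ "" ∧ s ∈ categories then some s else none) = some k := hf
      by_cases hqs : s ≠ "" ∧ s ∈ categories
      · rw [if_pos hqs] at hf'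
        have : s = k := by injection hf'
        exact this ▸ hqs
      · rw [if_neg hqs] at hf'
        cases hf'
  have hcount : (data.filterMap (pvF categories)).count k
      = data.countP (fun tx => pvF categories tx == some k) := List.count_filterMap
  have hsum : (data.map (fun tx => if (PySem.Dict.mk tx).get? "description" = some k then (1:Int) else 0)).sum
      = ((data.countP (fun tx => decide ((PySem.Dict.mk tx).get? "description" = some k)) : Nat) : Int) := by
    rw [show (fun tx => if (PySem.Dict.mk tx).get? "description" = some k then (1:Int) else 0)
        = (fun tx => if (decide ((PySem.Dict.mk tx).get? "description" = some k)) = true then (1:Int) else 0)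
      from by funext tx; simp]
    exact PySem.List.sum_map_ite_one_zero _ data
  have hcp : data.countP (fun tx => pvF categories tx == some k)
      = data.countP (fun tx => decide ((PySem.Dict.mk tx).get? "description" = some k)) := by
    apply List.countP_congr
    intro tx _
    simp [pvF_eq_some_iff categories tx k hq]
  simp only [hsum, ← hcp, ← hcount]
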